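-- pv_equiv track=rewrite | github.com/Claitos/FastResoParser | pdg_lib.py | product_checker
-- ===== SOURCE A (Python) =====
-- def product_checker(products_possibilities: list[list[str]], products_to_check: list[str]) -> bool:
--     """
--     Check if the products_to_check can be found in the products_possibilities.
--
--     Parameters:
--         products_possibilities (list[list[str]]): A list of lists of product names (formatted).
--         products_to_check (list[str]): A list of product names (formatted) to check.
--     Returns:
--         bool: True if all products_to_check can be found in products_possibilities, False otherwise.
--     """
--     # lokale Kopie, um nicht das Original zu zerstören
--     possibilities = [set(p) for p in products_possibilities]
--
--     for prod in products_to_check: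
--         # finde Index einer Liste, die das Produkt enthält
--         for i, group in enumerate(possibilities):
--             if prod in group:
--                 del possibilities[i]
--                 break
--         else:
--             # falls kein break -> Produkt nicht gefunden
--             return False
--
--     # true nur, wenn alles gefunden und nichts übrig
--     return len(possibilities) == 0
-- ===== SOURCE B (Python) =====
-- def product_checker(products_possibilities: list[list[str]], products_to_check: list[str]) -> bool:
--     # Build once: product -> increasing list of indices of groups containing it,
--     # then match each product to its first not-yet-removed group via flags.
--     index = {}
--     for i, group in enumerate(products_possibilities):
--         for prod in set(group):
--             index.setdefault(prod, []).append(i)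
--     removed = [False] * len(products_possibilities)
--     for prod in products_to_check:
--         for i in index.get(prod, []):
--             if not removed[i]:
--                 removed[i] = True
--                 break
--         else:
--             return False
--     return len(products_possibilities) == len(products_to_check)
-- ===== Notes on version B (the rewrite author's own statement) =====
-- stated objective: alternative
-- what changed: Instead of rescanning the whole list of group-sets for every product and deleting the hit, B builds a product-to-group-indices index once and marks matched groups in a removed-flags array, so each product only scans the groups that actually contain it.
import Mathlib
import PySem

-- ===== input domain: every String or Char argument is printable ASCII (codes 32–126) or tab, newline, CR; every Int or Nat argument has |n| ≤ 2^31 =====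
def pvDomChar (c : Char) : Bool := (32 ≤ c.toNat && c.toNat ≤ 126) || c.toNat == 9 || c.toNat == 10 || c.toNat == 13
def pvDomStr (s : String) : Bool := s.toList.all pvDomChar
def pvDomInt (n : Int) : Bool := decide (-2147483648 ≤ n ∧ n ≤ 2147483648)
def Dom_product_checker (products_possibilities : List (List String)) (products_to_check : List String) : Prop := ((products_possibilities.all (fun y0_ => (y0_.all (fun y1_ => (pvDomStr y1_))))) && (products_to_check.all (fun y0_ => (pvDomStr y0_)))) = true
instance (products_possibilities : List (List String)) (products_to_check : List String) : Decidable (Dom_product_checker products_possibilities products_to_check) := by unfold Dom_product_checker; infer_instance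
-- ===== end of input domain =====

-- B replaces A's per-product rescan of all group-sets (with deletion of the hit) by a
-- product→group-indices index built once plus a removed-flags array.

-- ===== PORT A =====
-- inner 'for i, group in enumerate(possibilities): if prod in group: … break / else:'
def pvFindHit (prod : String) : List (PySem.Set String) → Option Nat
  | [] => none
  | g :: gs => if PySem.Set.contains g prod then some 0 else (pvFindHit prod gs).map (· + 1)

-- 'for prod in products_to_check:' with 'del possibilities[i]' on a hit, else return False;
-- at the end 'return len(possibilities) == 0'
def pvLoopA : List (PySem.Set String) → List String → Bool
  | poss, [] => poss.length == 0
  | poss, prod :: rest =>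
    match pvFindHit prod poss with
    | some i => pvLoopA (poss.eraseIdx i) rest
    | none => false

def product_checker (products_possibilities : List (List String)) (products_to_check : List String) : Bool :=
  pvLoopA (products_possibilities.map PySem.Set.ofList) products_to_check

-- ===== PORT B =====
-- 'for i, group in enumerate(…): for prod in set(group): index.setdefault(prod, []).append(i)'
-- (the result only depends on the built dict's getD, so Python's set iteration order is immaterial)
def pvBuildIndex (products_possibilities : List (List String)) : PySem.Dict String (List Int) :=
  (PySem.List.enumerate products_possibilities).foldl
    (fun d ig =>
      (PySem.Set.ofList ig.2).foldl (fun d prod => d.insert prod (d.getD prod [] ++ [ig.1])) d)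
    PySem.Dict.empty

-- 'for i in index.get(prod, []): if not removed[i]: … break / else:'
def pvScan (removed : List Bool) : List Int → Option Int
  | [] => none
  | i :: rest => if PySem.List.pyGetD removed i false then pvScan removed rest else some i

-- 'for prod in products_to_check:' with 'removed[i] = True' on a hit, else return False
def pvLoopB (index : PySem.Dict String (List Int)) : List Bool → List String → Option (List Bool)
  | removed, [] => some removed
  | removed, prod :: rest =>
    match pvScan removed (index.getD prod []) with
    | some i => pvLoopB index (PySem.List.pySetD removed i true) rest
    | none => none

def product_checker_alt (products_possibilities : List (List String)) (products_to_check : List String) : Bool :=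
  let index := pvBuildIndex products_possibilities
  let removed := List.replicate products_possibilities.length false
  match pvLoopB index removed products_to_check with
  | some _ => products_possibilities.length == products_to_check.length
  | none => false

-- ===== PRECONDITION & SPEC =====
def Spec_product_checker (products_possibilities : List (List String)) (products_to_check : List String) (out : Bool) : Prop := out = product_checker_alt products_possibilities products_to_check
instance (products_possibilities : List (List String)) (products_to_check : List String) (out : Bool) : Decidable (Spec_product_checker products_possibilities products_to_check out) := by unfold Spec_product_checker; infer_instance

-- ===== CLAIM (what is proved, stated in full; the proofs are below) =====
def Claim_equal_product_checker : Prop := ∀ (products_possibilities : List (List String)) (products_to_check : List String), Dom_product_checker products_possibilities products_to_check → Spec_product_checker products_possibilities products_to_check (product_checker products_possibilities products_to_check)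

-- ===== LEMMAS AND PROOFS =====

-- the groups still alive under a removed-flags vector, in order (A's 'possibilities')
def pvFiltered : List (PySem.Set String) → List Bool → List (PySem.Set String)
  | g :: gs, b :: bs => if b then pvFiltered gs bs else g :: pvFiltered gs bs
  | _, _ => []

-- increasing list of the (Nat) indices of the groups containing prod
def pvCandN (prod : String) : List (PySem.Set String) → List Nat
  | [] => []
  | g :: gs => (if PySem.Set.contains g prod then [0] else []) ++ (pvCandN prod gs).map (· + 1)

-- Nat-index version of pvScan
def pvScanN (removed : List Bool) : List Nat → Option Nat
  | [] => none
  | k :: rest => if removed.getD k false then pvScanN removed rest else some k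

lemma pvScan_map_cast (removed : List Bool) (l : List Nat) :
    pvScan removed (l.map (fun (k : Nat) => (k : Int))) = (pvScanN removed l).map (fun (k : Nat) => (k : Int)) := by
  induction l with
  | nil => rfl
  | cons k rest ih =>
    show pvScan removed ((k : Int) :: rest.map (fun (k : Nat) => (k : Int)))
        = (pvScanN removed (k :: rest)).map (fun (k : Nat) => (k : Int))
    rw [show pvScan removed ((k : Int) :: rest.map (fun (k : Nat) => (k : Int)))
        = if PySem.List.pyGetD removed (k : Int) false then pvScan removed (rest.map (fun (k : Nat) => (k : Int))) else some (k : Int) from rfl]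
    rw [show pvScanN removed (k :: rest)
        = if removed.getD k false then pvScanN removed rest else some k from rfl]
    rw [PySem.List.pyGetD_natCast]
    split_ifs
    · exact ih
    · rfl

lemma pvScanN_shift (b : Bool) (bs : List Bool) (l : List Nat) :
    pvScanN (b :: bs) (l.map (· + 1)) = (pvScanN bs l).map (· + 1) := by
  induction l with
  | nil => rfl
  | cons k rest ih =>
    show pvScanN (b :: bs) ((k+1) :: rest.map (· + 1)) = (pvScanN bs (k :: rest)).map (· + 1)
    rw [show pvScanN (b :: bs) ((k+1) :: rest.map (· + 1))
        = if (b :: bs).getD (k+1) false then pvScanN (b :: bs) (rest.map (· + 1)) else some (k+1) from rfl]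
    rw [show pvScanN bs (k :: rest)
        = if bs.getD k false then pvScanN bs rest else some k from rfl]
    rw [List.getD_cons_succ]
    split_ifs
    · exact ih
    · rfl

lemma pvFindHit_lt (prod : String) : ∀ (poss : List (PySem.Set String)) (j : Nat),
    pvFindHit prod poss = some j → j < poss.length := by
  intro poss
  induction poss with
  | nil => intro j h; simp [pvFindHit] at h
  | cons g gs ih =>
    intro j h
    simp only [pvFindHit] at h
    split_ifs at h with hc
    · cases h; simp
    · rcases Option.map_eq_some_iff.mp h with ⟨j', hj', rfl⟩
      have := ih j' hj'
      simp; omega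

lemma pvInnerFold_getD (i : Int) :
    ∀ (ps : List String) (d : PySem.Dict String (List Int)) (q : String), ps.Nodup →
      (ps.foldl (fun d prod => d.insert prod (d.getD prod [] ++ [i])) d).getD q []
        = d.getD q [] ++ (if q ∈ ps then [i] else []) := by
  intro ps
  induction ps with
  | nil => intro d q _; simp
  | cons p rest ih =>
    intro d q hnd
    have hnd' := hnd
    rw [List.nodup_cons] at hnd'
    simp only [List.foldl_cons]
    rw [ih _ q hnd'.2]
    by_cases hq : q = p
    · subst hq
      rw [PySem.Dict.getD_insert_self]
      have : q ∉ rest := hnd'.1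
      simp [this]
    · rw [PySem.Dict.getD_insert_of_ne (hne := hq)]
      simp [List.mem_cons, hq]

lemma pvBuild_aux :
    ∀ (pp : List (List String)) (s : Int) (d : PySem.Dict String (List Int)) (q : String),
      ((PySem.List.enumerate pp s).foldl
          (fun d ig =>
            (PySem.Set.ofList ig.2).foldl (fun d prod => d.insert prod (d.getD prod [] ++ [ig.1])) d)
          d).getD q []
        = d.getD q [] ++ (pvCandN q (pp.map PySem.Set.ofList)).map (fun (k : Nat) => s + (k : Int)) := by
  intro pp
  induction pp with
  | nil => intro s d q; simp [PySem.List.enumerate_nil, pvCandN]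
  | cons g rest ih =>
    intro s d q
    rw [PySem.List.enumerate_cons, List.foldl_cons, ih]
    rw [pvInnerFold_getD _ _ _ _ (PySem.Set.nodup_ofList g)]
    have hcand : pvCandN q (List.map PySem.Set.ofList (g :: rest))
        = (if PySem.Set.contains (PySem.Set.ofList g) q then [0] else [])
          ++ (pvCandN q (rest.map PySem.Set.ofList)).map (· + 1) := rfl
    rw [hcand, List.map_append, List.map_map]
    have hmap : (pvCandN q (rest.map PySem.Set.ofList)).map ((fun (k : Nat) => s + (k : Int)) ∘ (· + 1))
        = (pvCandN q (rest.map PySem.Set.ofList)).map (fun (k : Nat) => (s + 1) + (k : Int)) := by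
      apply List.map_congr_left
      intro k _
      simp only [Function.comp_apply]
      push_cast
      ring
    rw [hmap, List.append_assoc]
    congr 1
    have hiff : PySem.Set.contains (PySem.Set.ofList g) q = true ↔ q ∈ g := by
      simp [PySem.Set.contains]
    by_cases hq : q ∈ g
    · have hb := hiff.mpr hq
      have hm : q ∈ PySem.Set.ofList g := by simp [PySem.Set.mem_ofList, hq]
      rw [if_pos hm, hb]
      norm_num
    · have hb : PySem.Set.contains (PySem.Set.ofList g) q = false := by
        rw [Bool.eq_false_iff]
        intro h
        exact hq (hiff.mp h)
      have hm : q ∉ PySem.Set.ofList g := by simp [PySem.Set.mem_ofList, hq]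
      rw [if_neg hm, hb]
      norm_num

lemma pvBuildIndex_getD (pp : List (List String)) (q : String) :
    (pvBuildIndex pp).getD q [] = (pvCandN q (pp.map PySem.Set.ofList)).map (fun (k : Nat) => (k : Int)) := by
  have h := pvBuild_aux pp 0 PySem.Dict.empty q
  rw [pvBuildIndex]
  rw [show PySem.List.enumerate pp = PySem.List.enumerate pp 0 from rfl]
  rw [h]
  simp

lemma pvStep :
    ∀ (gs : List (PySem.Set String)) (bs : List Bool), bs.length = gs.length → ∀ (prod : String),
      (pvScanN bs (pvCandN prod gs) = none → pvFindHit prod (pvFiltered gs bs) = none) ∧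
      (∀ k, pvScanN bs (pvCandN prod gs) = some k →
        ∃ j, pvFindHit prod (pvFiltered gs bs) = some j ∧
          pvFiltered gs (bs.set k true) = (pvFiltered gs bs).eraseIdx j) := by
  intro gs
  induction gs with
  | nil =>
    intro bs hlen prod
    have : bs = [] := List.length_eq_zero_iff.mp hlen
    subst this
    exact ⟨fun _ => rfl, fun k hk => by simp [pvScanN, pvCandN] at hk⟩
  | cons g gs ih =>
    intro bs hlen prod
    match bs with
    | b :: bs =>
    have hlen' : bs.length = gs.length := by simpa using hlen
    have hcand : pvCandN prod (g :: gs)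
        = (if PySem.Set.contains g prod then [0] else []) ++ (pvCandN prod gs).map (· + 1) := rfl
    by_cases hc : PySem.Set.contains g prod
    · -- head group contains prod
      rw [hcand, if_pos hc, List.singleton_append]
      cases b with
      | false =>
        -- scan hits index 0 immediately
        constructor
        · intro h
          rw [show pvScanN (false :: bs) (0 :: (pvCandN prod gs).map (· + 1))
              = if (false :: bs).getD 0 false then pvScanN (false :: bs) ((pvCandN prod gs).map (· + 1)) else some 0 from rfl] at h
          simp at h
        · intro k hk
          rw [show pvScanN (false :: bs) (0 :: (pvCandN prod gs).map (· + 1))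
              = if (false :: bs).getD 0 false then pvScanN (false :: bs) ((pvCandN prod gs).map (· + 1)) else some 0 from rfl] at hk
          simp at hk
          subst hk
          refine ⟨0, ?_, ?_⟩
          · show pvFindHit prod (pvFiltered (g :: gs) (false :: bs)) = some 0
            rw [show pvFiltered (g :: gs) (false :: bs) = g :: pvFiltered gs bs from rfl]
            rw [show pvFindHit prod (g :: pvFiltered gs bs)
                = if PySem.Set.contains g prod then some 0 else (pvFindHit prod (pvFiltered gs bs)).map (· + 1) from rfl]
            rw [if_pos hc]
          · show pvFiltered (g :: gs) (true :: bs) = (pvFiltered (g :: gs) (false :: bs)).eraseIdx 0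
            rw [show pvFiltered (g :: gs) (true :: bs) = pvFiltered gs bs from rfl]
            rw [show pvFiltered (g :: gs) (false :: bs) = g :: pvFiltered gs bs from rfl]
            rfl
      | true =>
        -- index 0 is removed: skip it, shift to the tail
        have hskip : pvScanN (true :: bs) (0 :: (pvCandN prod gs).map (· + 1))
            = (pvScanN bs (pvCandN prod gs)).map (· + 1) := by
          rw [show pvScanN (true :: bs) (0 :: (pvCandN prod gs).map (· + 1))
              = if (true :: bs).getD 0 false then pvScanN (true :: bs) ((pvCandN prod gs).map (· + 1)) else some 0 from rfl]
          simp only [List.getD_cons_zero, if_true]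
          exact pvScanN_shift true bs _
        have hfil : pvFiltered (g :: gs) (true :: bs) = pvFiltered gs bs := rfl
        constructor
        · intro h
          rw [hskip] at h
          have h' : pvScanN bs (pvCandN prod gs) = none := by
            cases hx : pvScanN bs (pvCandN prod gs) with
            | none => rfl
            | some k => rw [hx] at h; simp at h
          rw [hfil]
          exact (ih bs hlen' prod).1 h'
        · intro k hk
          rw [hskip] at hk
          rcases Option.map_eq_some_iff.mp hk with ⟨k', hk', rfl⟩
          rcases (ih bs hlen' prod).2 k' hk' with ⟨j, hj, herase⟩
          refine ⟨j, ?_, ?_⟩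
          · rw [hfil]; exact hj
          · show pvFiltered (g :: gs) (true :: bs.set k' true) = (pvFiltered (g :: gs) (true :: bs)).eraseIdx j
            rw [show pvFiltered (g :: gs) (true :: bs.set k' true) = pvFiltered gs (bs.set k' true) from rfl, hfil]
            exact herase
    · -- head group does not contain prod
      rw [hcand, if_neg hc]
      have hshift : pvScanN (b :: bs) ([] ++ (pvCandN prod gs).map (· + 1))
          = (pvScanN bs (pvCandN prod gs)).map (· + 1) := by
        rw [List.nil_append]; exact pvScanN_shift b bs _
      cases b with
      | true =>
        have hfil : pvFiltered (g :: gs) (true :: bs) = pvFiltered gs bs := rfl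
        constructor
        · intro h
          rw [hshift] at h
          have h' : pvScanN bs (pvCandN prod gs) = none := by
            cases hx : pvScanN bs (pvCandN prod gs) with
            | none => rfl
            | some k => rw [hx] at h; simp at h
          rw [hfil]
          exact (ih bs hlen' prod).1 h'
        · intro k hk
          rw [hshift] at hk
          rcases Option.map_eq_some_iff.mp hk with ⟨k', hk', rfl⟩
          rcases (ih bs hlen' prod).2 k' hk' with ⟨j, hj, herase⟩
          refine ⟨j, by rw [hfil]; exact hj, ?_⟩
          show pvFiltered (g :: gs) (true :: bs.set k' true) = (pvFiltered (g :: gs) (true :: bs)).eraseIdx j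
          rw [show pvFiltered (g :: gs) (true :: bs.set k' true) = pvFiltered gs (bs.set k' true) from rfl, hfil]
          exact herase
      | false =>
        have hfil : pvFiltered (g :: gs) (false :: bs) = g :: pvFiltered gs bs := rfl
        have hhit : pvFindHit prod (g :: pvFiltered gs bs)
            = (pvFindHit prod (pvFiltered gs bs)).map (· + 1) := by
          rw [show pvFindHit prod (g :: pvFiltered gs bs)
              = if PySem.Set.contains g prod then some 0 else (pvFindHit prod (pvFiltered gs bs)).map (· + 1) from rfl]
          rw [if_neg hc]
        constructor
        · intro h
          rw [hshift] at h
          have h' : pvScanN bs (pvCandN prod gs) = none := by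
            cases hx : pvScanN bs (pvCandN prod gs) with
            | none => rfl
            | some k => rw [hx] at h; simp at h
          rw [hfil, hhit, (ih bs hlen' prod).1 h']
          rfl
        · intro k hk
          rw [hshift] at hk
          rcases Option.map_eq_some_iff.mp hk with ⟨k', hk', rfl⟩
          rcases (ih bs hlen' prod).2 k' hk' with ⟨j, hj, herase⟩
          refine ⟨j + 1, ?_, ?_⟩
          · rw [hfil, hhit, hj]; rfl
          · show pvFiltered (g :: gs) (false :: bs.set k' true) = (pvFiltered (g :: gs) (false :: bs)).eraseIdx (j + 1)
            rw [show pvFiltered (g :: gs) (false :: bs.set k' true) = g :: pvFiltered gs (bs.set k' true) from rfl, hfil]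
            rw [List.eraseIdx_cons_succ, herase]

lemma pvMain (idx : PySem.Dict String (List Int)) (gs : List (PySem.Set String))
    (hidx : ∀ q, idx.getD q [] = (pvCandN q gs).map (fun (k : Nat) => (k : Int))) :
    ∀ (ptc : List String) (bs : List Bool), bs.length = gs.length →
      pvLoopA (pvFiltered gs bs) ptc
        = match pvLoopB idx bs ptc with
          | none => false
          | some _ => (pvFiltered gs bs).length == ptc.length := by
  intro ptc
  induction ptc with
  | nil => intro bs _; rfl
  | cons prod rest ih =>
    intro bs hlen
    have hscan : pvScan bs (idx.getD prod []) = (pvScanN bs (pvCandN prod gs)).map (fun (k : Nat) => (k : Int)) := by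
      rw [hidx, pvScan_map_cast]
    cases hs : pvScanN bs (pvCandN prod gs) with
    | none =>
      have hfind : pvFindHit prod (pvFiltered gs bs) = none := (pvStep gs bs hlen prod).1 hs
      rw [show pvLoopA (pvFiltered gs bs) (prod :: rest)
          = (match pvFindHit prod (pvFiltered gs bs) with
             | some i => pvLoopA ((pvFiltered gs bs).eraseIdx i) rest
             | none => false) from rfl, hfind]
      rw [show pvLoopB idx bs (prod :: rest)
          = (match pvScan bs (idx.getD prod []) with
             | some i => pvLoopB idx (PySem.List.pySetD bs i true) rest
             | none => none) from rfl, hscan, hs]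
      simp only [Option.map_none]
    | some k =>
      rcases (pvStep gs bs hlen prod).2 k hs with ⟨j, hj, herase⟩
      have hjlt : j < (pvFiltered gs bs).length := pvFindHit_lt prod _ j hj
      rw [show pvLoopA (pvFiltered gs bs) (prod :: rest)
          = (match pvFindHit prod (pvFiltered gs bs) with
             | some i => pvLoopA ((pvFiltered gs bs).eraseIdx i) rest
             | none => false) from rfl, hj]
      rw [show pvLoopB idx bs (prod :: rest)
          = (match pvScan bs (idx.getD prod []) with
             | some i => pvLoopB idx (PySem.List.pySetD bs i true) rest
             | none => none) from rfl, hscan, hs]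
      simp only [Option.map_some]
      rw [PySem.List.pySetD_natCast]
      rw [← herase, ih (bs.set k true) (by rw [List.length_set]; exact hlen)]
      cases pvLoopB idx (bs.set k true) rest with
      | none => rfl
      | some bs' =>
        simp only []
        rw [herase]
        rw [Bool.eq_iff_iff]
        simp only [beq_iff_eq, List.length_eraseIdx_of_lt hjlt, List.length_cons]
        omega

lemma pvFiltered_replicate : ∀ (gs : List (PySem.Set String)),
    pvFiltered gs (List.replicate gs.length false) = gs := by
  intro gs
  induction gs with
  | nil => rfl
  | cons g gs ih => simp [pvFiltered, List.replicate_succ, ih]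

-- ===== VERDICT (by name: the statement is the Claim_ definition above) =====
theorem product_checker_spec : Claim_equal_product_checker := by
  intro pp ptc _
  show product_checker pp ptc = product_checker_alt pp ptc
  have hgs : (pp.map PySem.Set.ofList).length = pp.length := by simp
  have hb := pvMain (pvBuildIndex pp) (pp.map PySem.Set.ofList)
      (fun q => pvBuildIndex_getD pp q) ptc (List.replicate pp.length false)
      (by rw [List.length_replicate, hgs])
  rw [show List.replicate pp.length false
      = List.replicate (pp.map PySem.Set.ofList).length false from by rw [hgs]] at hb
  rw [pvFiltered_replicate] at hb
  show pvLoopA (pp.map PySem.Set.ofList) ptc = product_checker_alt pp ptc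
  rw [hb]
  show _ = (match pvLoopB (pvBuildIndex pp) (List.replicate pp.length false) ptc with
    | some _ => pp.length == ptc.length
    | none => false)
  rw [show List.replicate (pp.map PySem.Set.ofList).length false
      = List.replicate pp.length false from by rw [hgs]]
  cases pvLoopB (pvBuildIndex pp) (List.replicate pp.length false) ptc with
  | none => rfl
  | some bs' => simp only [hgs]
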